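-- pv_equiv track=rewrite | github.com/bryancatanzaro/copperhead | copperhead/runtime/__init__.py | sanitize_flags
-- ===== SOURCE A (Python) =====
-- def sanitize_flags(flag_list, objectionables):
--     new_flags = []
--     shadow = False
--     for x in flag_list:
--         if shadow:
--             shadow = False
--         elif x in objectionables:
--             shadow = objectionables[x]
--         else:
--             new_flags.append(x)
--     return new_flags
-- ===== SOURCE B (Python) =====
-- def sanitize_flags(flag_list, objectionables):
--     flags = list(flag_list)
--     dropped = set()
--     i = 0
--     n = len(flags)
--     while i < n:
--         if flags[i] in objectionables:
--             dropped.add(i)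
--             if objectionables[flags[i]]:
--                 dropped.add(i + 1)
--                 i += 2
--                 continue
--         i += 1
--     return [x for j, x in enumerate(flags) if j not in dropped]
-- ===== Notes on version B (the rewrite author's own statement) =====
-- stated objective: alternative
-- what changed: Replaces A's one-pass shadow-boolean state machine with two staged passes: an index-jumping while loop that records the set of dropped positions (the flag's index, plus the next index for truthy values), then a comprehension over enumerate that keeps every element whose index is not in that set.
import Mathlib
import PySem

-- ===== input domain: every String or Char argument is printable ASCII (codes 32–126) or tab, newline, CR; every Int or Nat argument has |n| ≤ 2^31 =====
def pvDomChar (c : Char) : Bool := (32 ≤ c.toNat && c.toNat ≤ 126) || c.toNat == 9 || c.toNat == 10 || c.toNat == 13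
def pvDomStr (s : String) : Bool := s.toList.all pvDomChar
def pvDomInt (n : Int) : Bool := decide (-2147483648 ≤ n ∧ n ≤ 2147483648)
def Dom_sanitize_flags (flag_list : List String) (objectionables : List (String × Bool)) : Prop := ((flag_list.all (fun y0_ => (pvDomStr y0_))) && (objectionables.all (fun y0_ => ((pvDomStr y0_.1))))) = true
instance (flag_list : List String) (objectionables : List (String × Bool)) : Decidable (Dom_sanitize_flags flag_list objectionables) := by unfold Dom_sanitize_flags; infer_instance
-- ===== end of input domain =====

-- B replaces A's one-pass shadow-boolean state machine with two staged passes: an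
-- index-jumping while loop records the SET of dropped positions, then a filter over
-- enumerate keeps the elements whose index is not in it (alternative decomposition, same cost).

-- ===== PORT A =====
def sanitize_flags (flag_list : List String) (objectionables : List (String × Bool)) : List String :=
  (flag_list.foldl (fun (st : List String × Bool) x =>
    if st.2 then (st.1, false)
    else match (PySem.Dict.mk objectionables).get? x with
      | some b => (st.1, b)
      | none => (st.1 ++ [x], false)) ([], false)).1

-- ===== PORT B =====
-- the while loop: i jumps by 2 past a truthy objectionable flag, recording dropped indices
def sfDrops (flags : List String) (obj : List (String × Bool)) (i : Nat) (dropped : PySem.Set Int) : PySem.Set Int :=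
  if h : i < flags.length then
    match (PySem.Dict.mk obj).get? flags[i] with
    | some true => sfDrops flags obj (i + 2) (PySem.Set.add (PySem.Set.add dropped (i : Int)) ((i : Int) + 1))
    | some false => sfDrops flags obj (i + 1) (PySem.Set.add dropped (i : Int))
    | none => sfDrops flags obj (i + 1) dropped
  else dropped
termination_by flags.length - i

def sanitize_flags_alt (flag_list : List String) (objectionables : List (String × Bool)) : List String :=
  let flags := flag_list
  let dropped := sfDrops flags objectionables 0 PySem.Set.empty
  (PySem.List.enumerate flags).filterMap (fun p => if p.1 ∈ dropped then none else some p.2)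

-- ===== PRECONDITION & SPEC =====
def Spec_sanitize_flags (flag_list : List String) (objectionables : List (String × Bool)) (out : List String) : Prop := out = sanitize_flags_alt flag_list objectionables
instance (flag_list : List String) (objectionables : List (String × Bool)) (out : List String) : Decidable (Spec_sanitize_flags flag_list objectionables out) := by unfold Spec_sanitize_flags; infer_instance

-- ===== CLAIM (what is proved, stated in full; the proofs are below) =====
def Claim_equal_sanitize_flags : Prop := ∀ (flag_list : List String) (objectionables : List (String × Bool)), Dom_sanitize_flags flag_list objectionables → Spec_sanitize_flags flag_list objectionables (sanitize_flags flag_list objectionables)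

-- ===== LEMMAS AND PROOFS =====

-- common reference recursion: both ports are reduced to this jump recursion over the list
def sfGo (objectionables : List (String × Bool)) : List String → List String
  | [] => []
  | x :: rest =>
    match (PySem.Dict.mk objectionables).get? x with
    | none => x :: sfGo objectionables rest
    | some true => sfGo objectionables (rest.drop 1)
    | some false => sfGo objectionables rest
termination_by l => l.length
decreasing_by all_goals (simp; try omega)

-- A's fold equals sfGo
theorem sf_main (objectionables : List (String × Bool)) :
    ∀ (l : List String) (acc : List String),
      (l.foldl (fun (st : List String × Bool) x =>
        if st.2 then (st.1, false)
        else match (PySem.Dict.mk objectionables).get? x with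
          | some b => (st.1, b)
          | none => (st.1 ++ [x], false)) (acc, false)).1 = acc ++ sfGo objectionables l := by
  intro l
  induction l using sfGo.induct (objectionables := objectionables) with
  | case1 => intro acc; simp [sfGo]
  | case2 x rest h ih =>
    intro acc
    simp [List.foldl, h, sfGo, ih (acc ++ [x])]
  | case3 x rest h ih =>
    intro acc
    cases rest with
    | nil => simp [List.foldl, h, sfGo]
    | cons y rest' =>
      simp only [List.foldl, h, sfGo, List.drop_succ_cons, List.drop_zero]
      simpa using ih acc
  | case4 x rest h ih =>
    intro acc
    simp [List.foldl, h, sfGo, ih acc]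

-- unfolding equations for the while loop
theorem sfDrops_stop (flags : List String) (obj : List (String × Bool)) (i : Nat)
    (d : PySem.Set Int) (h : ¬ i < flags.length) : sfDrops flags obj i d = d := by
  rw [sfDrops]; simp [h]

theorem sfDrops_none (flags : List String) (obj : List (String × Bool)) (i : Nat)
    (d : PySem.Set Int) (h : i < flags.length)
    (hg : (PySem.Dict.mk obj).get? flags[i] = none) :
    sfDrops flags obj i d = sfDrops flags obj (i + 1) d := by
  rw [sfDrops]; simp [h, hg]

theorem sfDrops_false (flags : List String) (obj : List (String × Bool)) (i : Nat)
    (d : PySem.Set Int) (h : i < flags.length)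
    (hg : (PySem.Dict.mk obj).get? flags[i] = some false) :
    sfDrops flags obj i d = sfDrops flags obj (i + 1) (PySem.Set.add d (i : Int)) := by
  rw [sfDrops]; simp [h, hg]

theorem sfDrops_true (flags : List String) (obj : List (String × Bool)) (i : Nat)
    (d : PySem.Set Int) (h : i < flags.length)
    (hg : (PySem.Dict.mk obj).get? flags[i] = some true) :
    sfDrops flags obj i d
      = sfDrops flags obj (i + 2) (PySem.Set.add (PySem.Set.add d (i : Int)) ((i : Int) + 1)) := by
  rw [sfDrops]; simp [h, hg]

-- sfDrops with a low accumulator splits off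
theorem sfDrops_split (flags : List String) (obj : List (String × Bool)) :
    ∀ (k i : Nat) (d : List Int), flags.length - i ≤ k → (∀ j ∈ d, j < (i : Int)) →
      sfDrops flags obj i d = d ++ sfDrops flags obj i [] := by
  intro k
  induction k with
  | zero =>
    intro i d hk _
    have h : ¬ i < flags.length := by omega
    rw [sfDrops_stop flags obj i d h, sfDrops_stop flags obj i [] h]
    simp
  | succ k ih =>
    intro i d hk hd
    by_cases h : i < flags.length
    · have hni : ((i : Int)) ∉ d := fun hm => absurd (hd _ hm) (by omega)
      cases hg : (PySem.Dict.mk obj).get? flags[i] with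
      | none =>
        rw [sfDrops_none flags obj i d h hg, sfDrops_none flags obj i [] h hg]
        exact ih (i+1) d (by omega) (fun j hj => by have := hd j hj; push_cast; omega)
      | some b =>
        cases b with
        | false =>
          rw [sfDrops_false flags obj i d h hg, sfDrops_false flags obj i [] h hg]
          have e1 : PySem.Set.add d (i : Int) = d ++ [(i : Int)] := by
            simp [PySem.Set.add, PySem.Set.contains, hni]
          have e2 : PySem.Set.add ([] : List Int) (i : Int) = [(i : Int)] := rfl
          rw [e1, e2,
              ih (i+1) (d ++ [(i:Int)]) (by omega)
                (fun j hj => by rcases List.mem_append.1 hj with h1 | h1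
                                · have := hd j h1; push_cast; omega
                                · simp at h1; push_cast; omega),
              ih (i+1) [(i:Int)] (by omega)
                (by intro j hj; simp at hj; push_cast; omega)]
          simp
        | true =>
          rw [sfDrops_true flags obj i d h hg, sfDrops_true flags obj i [] h hg]
          have hni1 : ((i : Int) + 1) ∉ d := fun hm => absurd (hd _ hm) (by omega)
          have e1 : PySem.Set.add (PySem.Set.add d (i : Int)) ((i : Int) + 1)
              = d ++ [(i : Int), (i : Int) + 1] := by
            have h1 : PySem.Set.add d (i : Int) = d ++ [(i : Int)] := by
              simp [PySem.Set.add, PySem.Set.contains, hni]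
            rw [h1]
            have h2 : ((i : Int) + 1) ∉ d ++ [(i : Int)] := by
              simp [hni1]
            simp [PySem.Set.add, PySem.Set.contains, h2]
          have e2 : PySem.Set.add (PySem.Set.add ([] : List Int) (i : Int)) ((i : Int) + 1)
              = [(i : Int), (i : Int) + 1] := by
            simp [PySem.Set.add, PySem.Set.contains]
          rw [e1, e2,
              ih (i+2) (d ++ [(i:Int), (i:Int)+1]) (by omega)
                (fun j hj => by rcases List.mem_append.1 hj with h1 | h1
                                · have := hd j h1; push_cast; omega
                                · simp at h1; push_cast; omega),
              ih (i+2) [(i:Int), (i:Int)+1] (by omega)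
                (by intro j hj; simp at hj; push_cast; omega)]
          simp
    · rw [sfDrops_stop flags obj i d h, sfDrops_stop flags obj i [] h]; simp

-- every index recorded from i onwards is ≥ i
theorem sfDrops_ge (flags : List String) (obj : List (String × Bool)) :
    ∀ (k i : Nat), flags.length - i ≤ k →
      ∀ j ∈ sfDrops flags obj i [], (i : Int) ≤ j := by
  intro k
  induction k with
  | zero =>
    intro i hk j hj
    rw [sfDrops_stop flags obj i [] (by omega)] at hj
    simp at hj
  | succ k ih =>
    intro i hk j hj
    by_cases h : i < flags.length
    · cases hg : (PySem.Dict.mk obj).get? flags[i] with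
      | none =>
        rw [sfDrops_none flags obj i [] h hg] at hj
        have := ih (i+1) (by omega) j hj
        push_cast at this; omega
      | some b =>
        cases b with
        | false =>
          rw [sfDrops_false flags obj i [] h hg,
              show PySem.Set.add ([] : List Int) (i : Int) = [(i : Int)] from rfl,
              sfDrops_split flags obj k (i+1) [(i:Int)] (by omega)
                (by intro x hx; simp at hx; push_cast; omega)] at hj
          rcases List.mem_append.1 hj with h1 | h1
          · simp at h1; omega
          · have := ih (i+1) (by omega) j h1; push_cast at this; omega
        | true =>
          rw [sfDrops_true flags obj i [] h hg,
              show PySem.Set.add (PySem.Set.add ([] : List Int) (i : Int)) ((i : Int) + 1)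
                  = [(i : Int), (i : Int) + 1] by
                simp [PySem.Set.add, PySem.Set.contains],
              sfDrops_split flags obj k (i+2) [(i:Int), (i:Int)+1] (by omega)
                (by intro x hx; simp at hx; push_cast; omega)] at hj
          rcases List.mem_append.1 hj with h1 | h1
          · simp at h1; rcases h1 with h1 | h1 <;> omega
          · have := ih (i+2) (by omega) j h1; push_cast at this; omega
    · rw [sfDrops_stop flags obj i [] h] at hj; simp at hj

-- the enumerate-filter as a recursion with an index
def sfFilter (D : List Int) : Nat → List String → List String
  | _, [] => []
  | i, x :: rest => if (i : Int) ∈ D then sfFilter D (i+1) rest else x :: sfFilter D (i+1) rest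

theorem sfFilter_eq_filterMap (D : List Int) :
    ∀ (l : List String) (i : Nat),
      (PySem.List.enumerate l (i : Int)).filterMap
          (fun p => if p.1 ∈ D then none else some p.2) = sfFilter D i l := by
  intro l
  induction l with
  | nil => intro i; simp [PySem.List.enumerate_nil, sfFilter]
  | cons x rest ih =>
    intro i
    rw [PySem.List.enumerate_cons]
    by_cases h : ((i : Int)) ∈ D
    · simp only [List.filterMap_cons, h, if_pos, sfFilter]
      have := ih (i+1); push_cast at this ⊢; rw [← this]
    · simp only [List.filterMap_cons, sfFilter]
      rw [if_neg h, if_neg h]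
      have := ih (i+1); push_cast at this ⊢; rw [← this]

theorem sfFilter_congr (D D' : List Int) :
    ∀ (l : List String) (i : Nat), (∀ j : Int, (i : Int) ≤ j → (j ∈ D ↔ j ∈ D')) →
      sfFilter D i l = sfFilter D' i l := by
  intro l
  induction l with
  | nil => intro i _; simp [sfFilter]
  | cons x rest ih =>
    intro i hD
    have hi : ((i : Int) ∈ D) ↔ ((i : Int) ∈ D') := hD _ le_rfl
    have hrest := ih (i+1) (fun j hj => hD j (by push_cast at hj ⊢; omega))
    simp only [sfFilter]
    by_cases h : ((i : Int)) ∈ D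
    · rw [if_pos h, if_pos (hi.mp h), hrest]
    · rw [if_neg h, if_neg (fun hc => h (hi.mpr hc)), hrest]

-- main: filtering the tail from i by the drops recorded from i equals sfGo on the tail
theorem sf_alt_main (flags : List String) (obj : List (String × Bool)) :
    ∀ (k i : Nat), flags.length - i ≤ k →
      sfFilter (sfDrops flags obj i []) i (flags.drop i) = sfGo obj (flags.drop i) := by
  intro k
  induction k with
  | zero =>
    intro i hk
    rw [List.drop_eq_nil_of_le (by omega)]
    simp [sfFilter, sfGo]
  | succ k ih =>
    intro i hk
    by_cases h : i < flags.length
    · have hdrop : flags.drop i = flags[i] :: flags.drop (i+1) :=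
        (List.getElem_cons_drop h).symm
      cases hg : (PySem.Dict.mk obj).get? flags[i] with
      | none =>
        rw [sfDrops_none flags obj i [] h hg, hdrop]
        have hni : ((i : Int)) ∉ sfDrops flags obj (i+1) [] := fun hm => by
          have := sfDrops_ge flags obj k (i+1) (by omega) _ hm; push_cast at this; omega
        simp only [sfFilter, sfGo, hg]
        rw [if_neg hni, ih (i+1) (by omega)]
      | some b =>
        cases b with
        | false =>
          rw [sfDrops_false flags obj i [] h hg,
              show PySem.Set.add ([] : List Int) (i : Int) = [(i : Int)] from rfl,
              sfDrops_split flags obj k (i+1) [(i:Int)] (by omega)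
                (by intro x hx; simp at hx; push_cast; omega),
              hdrop]
          have hmem : ((i : Int)) ∈ [(i:Int)] ++ sfDrops flags obj (i+1) [] := by simp
          simp only [sfFilter, sfGo, hg]
          rw [if_pos hmem,
              sfFilter_congr _ (sfDrops flags obj (i+1) []) _ (i+1)
                (by intro j hj
                    constructor
                    · intro hm
                      rcases List.mem_append.1 hm with h1 | h1
                      · simp at h1; push_cast at hj; omega
                      · exact h1
                    · intro hm; exact List.mem_append.2 (Or.inr hm)),
              ih (i+1) (by omega)]
        | true =>
          rw [sfDrops_true flags obj i [] h hg,
              show PySem.Set.add (PySem.Set.add ([] : List Int) (i : Int)) ((i : Int) + 1)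
                  = [(i : Int), (i : Int) + 1] by
                simp [PySem.Set.add, PySem.Set.contains],
              sfDrops_split flags obj k (i+2) [(i:Int), (i:Int)+1] (by omega)
                (by intro x hx; simp at hx; push_cast; omega),
              hdrop]
          have hmem : ((i : Int)) ∈ [(i:Int), (i:Int)+1] ++ sfDrops flags obj (i+2) [] := by simp
          simp only [sfFilter, sfGo, hg]
          rw [if_pos hmem]
          cases hdrop1 : flags.drop (i+1) with
          | nil => simp [sfFilter, sfGo]
          | cons y rest2 =>
            have hc : (((i + 1 : Nat)) : Int) ∈ [(i:Int), (i:Int)+1] ++ sfDrops flags obj (i+2) [] := by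
              push_cast; simp
            have hrest2 : rest2 = flags.drop (i+2) := by
              have hh : flags.drop (i+2) = (flags.drop (i+1)).drop 1 := by
                rw [List.drop_drop]
              rw [hh, hdrop1]; simp
            simp only [sfFilter, List.drop_succ_cons, List.drop_zero]
            rw [if_pos hc,
                sfFilter_congr _ (sfDrops flags obj (i+2) []) _ (i+2)
                  (by intro j hj
                      constructor
                      · intro hm
                        rcases List.mem_append.1 hm with h1 | h1
                        · simp at h1; push_cast at hj; omega
                        · exact h1
                      · intro hm; exact List.mem_append.2 (Or.inr hm)),
                hrest2, ih (i+2) (by omega)]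
    · rw [List.drop_eq_nil_of_le (by omega)]
      simp [sfFilter, sfGo]

-- ===== VERDICT (by name: the statement is the Claim_ definition above) =====
theorem sanitize_flags_spec : Claim_equal_sanitize_flags := by
  intro fl obj _
  unfold Spec_sanitize_flags sanitize_flags sanitize_flags_alt
  rw [sf_main obj fl []]
  have h1 := sfFilter_eq_filterMap (sfDrops fl obj 0 []) fl 0
  have h2 := sf_alt_main fl obj fl.length 0 (by omega)
  simp only [List.drop_zero] at h2
  have h0 : (PySem.Set.empty : PySem.Set Int) = [] := rfl
  simp only [h0, Nat.cast_zero] at h1 ⊢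
  rw [h1, h2]
  simp
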